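-- pv_equiv track=rewrite | github.com/MrBrantCode/unitest_baseline | mut_generate/mist_train_cf/cf_58742/solution.py | rolling_min
-- ===== SOURCE A (Python) =====
-- from typing import List
--
-- def rolling_min(numbers1: List[int], numbers2: List[int], numbers3: List[int]) -> List[int]:
--     min_list = []
--     min_values = [float('inf')] * 3
--     for n1, n2, n3 in zip(numbers1, numbers2, numbers3):
--         min_values[0] = min(min_values[0], n1)
--         min_values[1] = min(min_values[1], n2)
--         min_values[2] = min(min_values[2], n3)
--         min_list.append(min(min_values))
--
--     return min_list
-- ===== SOURCE B (Python) =====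
-- from itertools import accumulate
-- from typing import List
--
-- def rolling_min(numbers1: List[int], numbers2: List[int], numbers3: List[int]) -> List[int]:
--     mins = [min(n1, n2, n3) for n1, n2, n3 in zip(numbers1, numbers2, numbers3)]
--     return list(accumulate(mins, min))
-- ===== Notes on version B (the rewrite author's own statement) =====
-- stated objective: simpler
-- what changed: B replaces A's three-slot running-minima array (three updates plus a min over the array per step) with a two-pass build-then-fold: a per-index min over the zipped triples followed by a running minimum via itertools.accumulate, tracking one accumulated value.
import Mathlib
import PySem

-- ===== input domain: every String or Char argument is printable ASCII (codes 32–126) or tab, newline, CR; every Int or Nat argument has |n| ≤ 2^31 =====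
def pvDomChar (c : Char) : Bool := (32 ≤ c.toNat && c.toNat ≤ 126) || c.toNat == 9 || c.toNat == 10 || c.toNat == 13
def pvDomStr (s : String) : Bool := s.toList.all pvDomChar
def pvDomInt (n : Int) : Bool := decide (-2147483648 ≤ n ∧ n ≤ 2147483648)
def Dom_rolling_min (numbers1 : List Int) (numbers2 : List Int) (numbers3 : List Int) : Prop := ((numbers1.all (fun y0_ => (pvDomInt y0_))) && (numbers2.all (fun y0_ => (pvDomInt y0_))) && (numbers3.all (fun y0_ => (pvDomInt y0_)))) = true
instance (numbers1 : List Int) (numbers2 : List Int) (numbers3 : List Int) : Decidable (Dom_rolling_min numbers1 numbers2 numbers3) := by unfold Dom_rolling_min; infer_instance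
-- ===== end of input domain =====

-- B builds the per-index min list and takes its running minimum with a single accumulator,
-- instead of A's three-slot running-minima array; same cost, simpler decomposition.

-- ===== PORT A =====
-- Python's float('inf') sentinel is modelled by `none` (min(inf, n) = n exactly, since all data are ints).
def pyMinO (m : Option Int) (n : Int) : Int :=
  match m with
  | none => n
  | some v => min v n

-- the for-loop over zip(numbers1, numbers2, numbers3): state = (min_values[0..2], min_list)
def rollingLoopA (st : Option Int × Option Int × Option Int × List Int)
    (ts : List (Int × Int × Int)) : List Int :=
  match ts with
  | [] => st.2.2.2
  | (a, b, c) :: rest =>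
      let m1 := pyMinO st.1 a
      let m2 := pyMinO st.2.1 b
      let m3 := pyMinO st.2.2.1 c
      -- min(min_values) on a 3-list = min (min m1 m2) m3 (Python's left-to-right min)
      rollingLoopA (some m1, some m2, some m3, st.2.2.2 ++ [min (min m1 m2) m3]) rest

def rolling_min (numbers1 : List Int) (numbers2 : List Int) (numbers3 : List Int) : List Int :=
  rollingLoopA (none, none, none, []) (numbers1.zip (numbers2.zip numbers3))

-- ===== PORT B =====
-- accumulate(mins, min): running minimum with one accumulator
def accMin (acc : Int) : List Int → List Int
  | [] => []
  | x :: xs => let a := min acc x; a :: accMin a xs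

def rolling_min_alt (numbers1 : List Int) (numbers2 : List Int) (numbers3 : List Int) : List Int :=
  let mins := (numbers1.zip (numbers2.zip numbers3)).map (fun t => min (min t.1 t.2.1) t.2.2)
  match mins with
  | [] => []
  | h :: t => h :: accMin h t

-- ===== PRECONDITION & SPEC =====
def Spec_rolling_min (numbers1 : List Int) (numbers2 : List Int) (numbers3 : List Int) (out : List Int) : Prop := out = rolling_min_alt numbers1 numbers2 numbers3
instance (numbers1 : List Int) (numbers2 : List Int) (numbers3 : List Int) (out : List Int) : Decidable (Spec_rolling_min numbers1 numbers2 numbers3 out) := by unfold Spec_rolling_min; infer_instance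

-- ===== CLAIM (what is proved, stated in full; the proofs are below) =====
def Claim_equal_rolling_min : Prop := ∀ (numbers1 : List Int) (numbers2 : List Int) (numbers3 : List Int), Dom_rolling_min numbers1 numbers2 numbers3 → Spec_rolling_min numbers1 numbers2 numbers3 (rolling_min numbers1 numbers2 numbers3)

-- ===== LEMMAS AND PROOFS =====

-- once all three slots hold values, the loop output is acc ++ running-min of per-index mins
theorem rollingLoopA_some (ts : List (Int × Int × Int)) :
    ∀ (m1 m2 m3 : Int) (acc : List Int),
      rollingLoopA (some m1, some m2, some m3, acc) ts
        = acc ++ accMin (min (min m1 m2) m3) (ts.map (fun t => min (min t.1 t.2.1) t.2.2)) := by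
  induction ts with
  | nil => intro m1 m2 m3 acc; simp [rollingLoopA, accMin]
  | cons t rest ih =>
      intro m1 m2 m3 acc
      obtain ⟨a, b, c⟩ := t
      simp only [rollingLoopA, pyMinO, List.map, accMin, ih]
      have h : min (min (min m1 a) (min m2 b)) (min m3 c)
          = min (min (min m1 m2) m3) (min (min a b) c) := by omega
      rw [h]
      simp

theorem rolling_min_spec : Claim_equal_rolling_min := by
  intro n1 n2 n3 _
  show rolling_min n1 n2 n3 = rolling_min_alt n1 n2 n3
  unfold rolling_min rolling_min_alt
  cases h : n1.zip (n2.zip n3) with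
  | nil => simp [rollingLoopA]
  | cons t rest =>
      obtain ⟨a, b, c⟩ := t
      simp [rollingLoopA, pyMinO, rollingLoopA_some]
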